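-- pv_equiv track=rewrite | github.com/paulklemstine/L.O.V.E | core/reasoning.py | _find_exploitation_paths
-- ===== SOURCE A (Python) =====
-- def _find_exploitation_paths(opportunities):
--     """
--     Constructs multi-stage exploitation paths from a list of single opportunities.
--
--     Args:
--         opportunities (list): A list of identified opportunities.
--
--     Returns:
--         list: A list of multi-stage exploitation paths.
--     """
--     # This is a simplified pathfinder. A more advanced version would use a graph traversal algorithm.
--     paths = []
--     for opportunity in opportunities:
--         if "Anonymous FTP login" in opportunity:
--             # If we have FTP access, look for files that could be read.
--             for other_opportunity in opportunities:
--                 if "potential private key file" in other_opportunity or "crypto wallet file" in other_opportunity: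
--                     path = f"Path found: 1. Use Anonymous FTP to access the file system. 2. Download the high-value file ({other_opportunity.split(' ')[-1]})."
--                     paths.append(path)
--
--     if not paths:
--         return opportunities # Return single-step opportunities if no paths are found.
--
--     return paths
-- ===== SOURCE B (Python) =====
-- def _find_exploitation_paths(opportunities):
--     # Build the formatted high-value-file path strings once, then replicate them
--     # once per FTP-login opportunity instead of rescanning the list each time.
--     formatted = [
--         f"Path found: 1. Use Anonymous FTP to access the file system. 2. Download the high-value file ({o.split(' ')[-1]})."
--         for o in opportunities
--         if "potential private key file" in o or "crypto wallet file" in o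
--     ]
--     n = sum(1 for o in opportunities if "Anonymous FTP login" in o)
--     paths = formatted * n
--     return paths if paths else opportunities
-- ===== Notes on version B (the rewrite author's own statement) =====
-- stated objective: simpler
-- what changed: Replaces the nested rescan (inner filter re-run for every FTP opportunity) with one pass that builds the formatted file-string list once, one pass that counts FTP opportunities, and a list replication formatted * n.
import Mathlib
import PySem

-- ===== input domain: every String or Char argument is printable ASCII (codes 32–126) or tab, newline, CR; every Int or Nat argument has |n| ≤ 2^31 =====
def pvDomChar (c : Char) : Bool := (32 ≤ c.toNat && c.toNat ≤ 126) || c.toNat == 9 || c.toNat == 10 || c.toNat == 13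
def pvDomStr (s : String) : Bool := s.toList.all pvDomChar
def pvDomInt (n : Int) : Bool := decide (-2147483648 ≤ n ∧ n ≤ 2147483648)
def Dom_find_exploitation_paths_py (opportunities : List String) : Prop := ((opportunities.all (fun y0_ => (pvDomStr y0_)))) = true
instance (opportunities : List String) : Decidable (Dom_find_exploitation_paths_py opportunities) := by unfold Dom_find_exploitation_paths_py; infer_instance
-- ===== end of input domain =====

-- B builds the formatted file-string list once and replicates it per FTP opportunity,
-- replacing A's nested rescan; return values proved equal (simpler decomposition, no speed claim).


-- shared by both ports: the f-string body (identical formatting expression in Source A and Source B)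
def pvPathStr (other : String) : String :=
  "Path found: 1. Use Anonymous FTP to access the file system. 2. Download the high-value file ("
    ++ String.ofList (PySem.List.pyGetD (PySem.Chars.splitOn other.toList " ".toList) (-1) []) ++ ")."

-- the two substring tests ("… in o") used by both sources
def pvIsHigh (o : String) : Bool :=
  PySem.Str.isIn "potential private key file" o || PySem.Str.isIn "crypto wallet file" o

def pvIsFtp (o : String) : Bool := PySem.Str.isIn "Anonymous FTP login" o

-- ===== PORT A =====
def find_exploitation_paths_py (opportunities : List String) : List String :=
  let paths :=
    opportunities.foldl
      (fun paths opportunity =>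
        if pvIsFtp opportunity then
          opportunities.foldl
            (fun paths other => if pvIsHigh other then paths ++ [pvPathStr other] else paths)
            paths
        else paths)
      []
  if paths = [] then opportunities else paths

-- ===== PORT B =====
def find_exploitation_paths_py_alt (opportunities : List String) : List String :=
  let formatted := (opportunities.filter pvIsHigh).map pvPathStr
  let n := (opportunities.filter pvIsFtp).length
  let paths := (List.replicate n formatted).flatten
  if paths = [] then opportunities else paths

-- ===== PRECONDITION & SPEC =====
def Spec_find_exploitation_paths_py (opportunities : List String) (out : List String) : Prop := out = find_exploitation_paths_py_alt opportunities
instance (opportunities : List String) (out : List String) : Decidable (Spec_find_exploitation_paths_py opportunities out) := by unfold Spec_find_exploitation_paths_py; infer_instance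

-- ===== CLAIM (what is proved, stated in full; the proofs are below) =====
def Claim_equal_find_exploitation_paths_py : Prop := ∀ (opportunities : List String), Dom_find_exploitation_paths_py opportunities → Spec_find_exploitation_paths_py opportunities (find_exploitation_paths_py opportunities)

-- ===== LEMMAS AND PROOFS =====

-- the outer loop of A, with its inner loop already rewritten to "++ F", appends F once per FTP line
theorem pv_outer_foldl (F : List String) (l : List String) (acc : List String) :
    l.foldl (fun paths o => if pvIsFtp o then paths ++ F else paths) acc
      = acc ++ (List.replicate (l.countP pvIsFtp) F).flatten := by
  induction l generalizing acc with
  | nil => simp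
  | cons x xs ih =>
      simp only [List.foldl_cons, List.countP_cons]
      by_cases h : pvIsFtp x
      · simp [h, ih, List.replicate_succ]
      · simp [h, ih]

theorem find_exploitation_paths_py_eq (opportunities : List String) :
    find_exploitation_paths_py opportunities = find_exploitation_paths_py_alt opportunities := by
  unfold find_exploitation_paths_py find_exploitation_paths_py_alt
  have hinner : ∀ (acc : List String),
      opportunities.foldl
        (fun paths other => if pvIsHigh other then paths ++ [pvPathStr other] else paths) acc
        = acc ++ (opportunities.filter pvIsHigh).map pvPathStr := by
    intro acc
    exact PySem.List.foldl_append_if pvIsHigh pvPathStr opportunities acc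
  simp only [hinner]
  rw [pv_outer_foldl]
  rw [List.countP_eq_length_filter]
  simp

-- ===== VERDICT (by name: the statement is the Claim_ definition above) =====
theorem find_exploitation_paths_py_spec : Claim_equal_find_exploitation_paths_py := by
  intro opportunities _
  unfold Spec_find_exploitation_paths_py
  exact find_exploitation_paths_py_eq opportunities
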